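-- pv_equiv track=rewrite | github.com/MatiPl01/Algorytmy-i-struktury-danych | Egzaminy/2020-2021/Termin zerowy - dla osób z podobieństwem kodu/zad1-v2.py | tanagram
-- ===== SOURCE A (Python) =====
-- def counting_sort(arr, fn):
--     if arr:
--         min_, max_ = minmax(arr, fn)
--         _counting_sort(arr, min_, max_, fn)
--
-- def minmax(arr, fn):
--     global_min = global_max = fn(arr[-1])
--
--     for i in range(0, len(arr) - 1, 2):
--         a = fn(arr[i])
--         b = fn(arr[i + 1])
--         if a > b:
--             if a > global_max: global_max = a
--             if b < global_min: global_min = b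
--         else:
--             if b > global_max: global_max = b
--             if a < global_min: global_min = a
--     return global_min, global_max
--
-- def _counting_sort(arr, k: 'the lower bound', m: 'the upper bound', fn):
--     # Allocate memory for required temporary arrays
--     counts = [0] * (m - k + 1)
--     temp = [None] * len(arr)
--     # Count values repetitions
--     for val in arr:
--         counts[fn(val) - k] += 1
--     # Modify the counts array to indicate how many values are not greater than the current one
--     for i in range(1, len(counts)):
--         counts[i] += counts[i - 1]
--     # Rewrite values to the temp sorted array
--     for i in range(len(arr) - 1, -1, -1):
--         idx = fn(arr[i]) - k
--         counts[idx] -= 1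
--         temp[counts[idx]] = arr[i]
--     # Rewrite sorted values to the initial array
--     for i in range(len(temp)):
--         arr[i] = temp[i]
--
-- def tanagram(x, y, t):
--     if len(x) != len(y): return False
--     n = len(x)
--     x_arr = [(x[i], i) for i in range(n)]
--     y_arr = [(y[i], i) for i in range(n)]
--     counting_sort(x_arr, fn=lambda a: ord(a[0]))
--     counting_sort(y_arr, fn=lambda b: ord(b[0]))
--     for i in range(n):
--         if x_arr[i][0] != y_arr[i][0] or abs(x_arr[i][1] - y_arr[i][1]) > t:
--             return False
--     return True
-- ===== SOURCE B (Python) =====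
-- def tanagram(x, y, t):
--     if len(x) != len(y): return False
--     bx = {}
--     for i, c in enumerate(x): bx.setdefault(c, []).append(i)
--     by = {}
--     for i, c in enumerate(y): by.setdefault(c, []).append(i)
--     for c, xs in bx.items():
--         ys = by.get(c, [])
--         if len(ys) != len(xs): return False
--         for a, b in zip(xs, ys):
--             if abs(a - b) > t: return False
--     return True
-- ===== Notes on version B (the rewrite author's own statement) =====
-- stated objective: simpler
-- what changed: A counting-sorts both (char, index) pair lists (with a hand-rolled minmax and prefix-sum placement) and compares them position by position; B never sorts: it builds a dict of per-character index buckets for each string and compares bucket lengths and zipped index distances per character.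
import Mathlib
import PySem

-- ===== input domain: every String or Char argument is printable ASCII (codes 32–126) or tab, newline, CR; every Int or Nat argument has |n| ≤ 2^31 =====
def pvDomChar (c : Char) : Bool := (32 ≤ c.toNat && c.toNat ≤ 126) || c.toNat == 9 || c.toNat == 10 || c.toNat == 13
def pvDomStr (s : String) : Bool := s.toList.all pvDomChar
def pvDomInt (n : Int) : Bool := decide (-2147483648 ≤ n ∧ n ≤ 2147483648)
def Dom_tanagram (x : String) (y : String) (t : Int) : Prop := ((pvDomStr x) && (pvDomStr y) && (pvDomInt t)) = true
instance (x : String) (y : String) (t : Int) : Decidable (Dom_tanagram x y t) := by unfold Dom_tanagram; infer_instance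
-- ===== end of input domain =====

-- B replaces A's two counting sorts by per-character index buckets compared pairwise (no sorting).

-- ===== PORT A =====
-- fn = lambda a: ord(a[0])
def keyA (p : Char × Int) : Int := (p.1.toNat : Int)

-- port of minmax / _counting_sort / counting_sort (the sorted arr is returned instead of rewritten in place)
def minmaxA (arr : List (Char × Int)) : Int × Int :=
  let g0 := keyA (PySem.List.pyGetD arr (-1) default)
  (PySem.List.pyRange 0 ((arr.length : Int) - 1) 2).foldl
    (fun gm i =>
      let a := keyA (PySem.List.pyGetD arr i default)
      let b := keyA (PySem.List.pyGetD arr (i + 1) default)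
      if a > b then
        (if b < gm.1 then b else gm.1, if a > gm.2 then a else gm.2)
      else
        (if a < gm.1 then a else gm.1, if b > gm.2 then b else gm.2))
    (g0, g0)

def csortA (arr : List (Char × Int)) (k m : Int) : List (Char × Int) :=
  let counts0 : List Int := List.replicate (m - k + 1).toNat 0
  let counts1 := arr.foldl
    (fun cs val => PySem.List.pySetD cs (keyA val - k) (PySem.List.pyGetD cs (keyA val - k) 0 + 1)) counts0
  let counts2 := (PySem.List.pyRange 1 (counts1.length : Int) 1).foldl
    (fun cs i => PySem.List.pySetD cs i (PySem.List.pyGetD cs i 0 + PySem.List.pyGetD cs (i - 1) 0)) counts1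
  let st := (PySem.List.pyRange ((arr.length : Int) - 1) (-1) (-1)).foldl
    (fun (st : List Int × List (Option (Char × Int))) i =>
      let v := PySem.List.pyGetD arr i default
      let c := PySem.List.pyGetD st.1 (keyA v - k) 0 - 1
      (PySem.List.pySetD st.1 (keyA v - k) c, PySem.List.pySetD st.2 c (some v)))
    (counts2, List.replicate arr.length (none : Option (Char × Int)))
  st.2.map (fun o => o.getD default)

def countingSortA (arr : List (Char × Int)) : List (Char × Int) :=
  if arr.isEmpty then arr else csortA arr (minmaxA arr).1 (minmaxA arr).2

def tanagram (x : String) (y : String) (t : Int) : Bool :=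
  if PySem.Str.len x ≠ PySem.Str.len y then false else
  let n := PySem.Str.len x
  let xs := countingSortA ((PySem.List.pyRange 0 n 1).map (fun i => ((PySem.Str.pyGet? x i).getD default, i)))
  let ys := countingSortA ((PySem.List.pyRange 0 n 1).map (fun i => ((PySem.Str.pyGet? y i).getD default, i)))
  (PySem.List.pyRange 0 n 1).all (fun i =>
    !(((PySem.List.pyGetD xs i default).1 ≠ (PySem.List.pyGetD ys i default).1 : Bool)
      || |(PySem.List.pyGetD xs i default).2 - (PySem.List.pyGetD ys i default).2| > t))

-- ===== PORT B =====
-- for i, c in enumerate(s): d.setdefault(c, []).append(i)   (= d[c] = d.get(c, []) + [i])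
def bucketsB (s : List Char) : PySem.Dict Char (List Int) :=
  (PySem.List.enumerate s 0).foldl (fun d p => d.modify p.2 [] (· ++ [p.1])) PySem.Dict.empty

def tanagram_alt (x : String) (y : String) (t : Int) : Bool :=
  if PySem.Str.len x ≠ PySem.Str.len y then false else
  let bY := bucketsB y.toList
  (bucketsB x.toList).items.all (fun p =>
    let ys := bY.getD p.1 []
    (ys.length == p.2.length) && (p.2.zip ys).all (fun q => !(|q.1 - q.2| > t)))

-- ===== PRECONDITION & SPEC =====
def Spec_tanagram (x : String) (y : String) (t : Int) (out : Bool) : Prop := out = tanagram_alt x y t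
instance (x : String) (y : String) (t : Int) (out : Bool) : Decidable (Spec_tanagram x y t out) := by unfold Spec_tanagram; infer_instance

-- ===== CLAIM (what is proved, stated in full; the proofs are below) =====
def Claim_equal_tanagram : Prop := ∀ (x : String) (y : String) (t : Int), Dom_tanagram x y t → Spec_tanagram x y t (tanagram x y t)

-- ===== LEMMAS AND PROOFS =====

def cntKH (k j : Int) (l : List (Char × Int)) : Nat :=
  (l.filter (fun a => keyA a - k == j)).length

theorem pyGetD_toNat {α : Type} (xs : List α) (i : Int) (d : α) (h : 0 ≤ i) :
    PySem.List.pyGetD xs i d = xs.getD i.toNat d := by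
  rw [show i = ((i.toNat : Nat) : Int) by omega, PySem.List.pyGetD_natCast]
  simp only [List.getD_eq_getElem?_getD]
  congr 2
theorem pyGetD_pySetD_full {α : Type} (cs : List α) (i j : Int) (v d : α)
    (hj0 : 0 ≤ j) (hj : j < (cs.length : Int)) (hi0 : 0 ≤ i) :
    PySem.List.pyGetD (PySem.List.pySetD cs j v) i d
      = if i = j then v else PySem.List.pyGetD cs i d := by
  rw [PySem.List.pySetD_of_nonneg _ _ hj0, pyGetD_toNat _ _ _ hi0, pyGetD_toNat _ _ _ hi0]
  simp only [List.getD_eq_getElem?_getD, List.getElem?_set]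
  by_cases hij : i = j
  · simp [hij, show j.toNat < cs.length by omega]
  · have h2 : ¬ (j.toNat = i.toNat) := by omega
    simp [h2, hij]

theorem counts1_spec (k : Int) (l : List (Char × Int)) (cs : List Int)
    (hb : ∀ a ∈ l, 0 ≤ keyA a - k ∧ keyA a - k < (cs.length : Int)) :
    (l.foldl (fun cs val => PySem.List.pySetD cs (keyA val - k)
        (PySem.List.pyGetD cs (keyA val - k) 0 + 1)) cs).length = cs.length ∧
    ∀ i : Int, 0 ≤ i →
      PySem.List.pyGetD (l.foldl (fun cs val => PySem.List.pySetD cs (keyA val - k)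
        (PySem.List.pyGetD cs (keyA val - k) 0 + 1)) cs) i 0
        = PySem.List.pyGetD cs i 0 + (cntKH k i l : Int) := by
  induction l generalizing cs with
  | nil => simp [cntKH]
  | cons a l ih =>
    have hba := hb a (List.mem_cons_self ..)
    have hlen' : (PySem.List.pySetD cs (keyA a - k) (PySem.List.pyGetD cs (keyA a - k) 0 + 1)).length = cs.length :=
      PySem.List.length_pySetD ..
    obtain ⟨ihlen, ihval⟩ := ih (PySem.List.pySetD cs (keyA a - k) (PySem.List.pyGetD cs (keyA a - k) 0 + 1))
      (by rw [hlen']; exact fun b hbmem => hb b (List.mem_cons_of_mem _ hbmem))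
    refine ⟨by simpa [hlen'] using ihlen, ?_⟩
    intro i hi
    simp only [List.foldl_cons]
    rw [ihval i hi, pyGetD_pySetD_full cs i (keyA a - k) _ 0 hba.1 hba.2 hi]
    simp only [cntKH, List.filter_cons]
    by_cases hcase : keyA a - k = i
    · simp [hcase]
      omega
    · have : (keyA a - k == i) = false := by simp [hcase]
      simp [this, Ne.symm hcase]

theorem prefix_spec (cs : List Int) (p : Nat) (hp : p ≤ cs.length) (h1 : 1 ≤ p) :
    ((PySem.List.pyRange 1 (p : Int) 1).foldl
      (fun cs i => PySem.List.pySetD cs i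
        (PySem.List.pyGetD cs i 0 + PySem.List.pyGetD cs (i - 1) 0)) cs).length = cs.length ∧
    ∀ j : Nat, j < cs.length →
      PySem.List.pyGetD ((PySem.List.pyRange 1 (p : Int) 1).foldl
        (fun cs i => PySem.List.pySetD cs i
          (PySem.List.pyGetD cs i 0 + PySem.List.pyGetD cs (i - 1) 0)) cs) (j : Int) 0
        = if j < p then ((List.range (j + 1)).map (fun (i : Nat) => PySem.List.pyGetD cs ((i : Nat) : Int) 0)).sum
          else PySem.List.pyGetD cs (j : Int) 0 := by
  induction p, h1 using Nat.le_induction with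
  | base =>
    rw [show ((1 : Nat) : Int) = 1 by norm_num, PySem.List.pyRange_one_eq_nil (by omega)]
    refine ⟨rfl, ?_⟩
    intro j hj
    simp only [List.foldl_nil]
    by_cases hj0 : j < 1
    · have : j = 0 := by omega
      simp [this, PySem.List.pyGetD_zero, List.getD_eq_getElem?_getD]
    · simp [hj0]
  | succ p h1 ih =>
    obtain ⟨ihlen, ihval⟩ := ih (by omega)
    rw [show ((p + 1 : Nat) : Int) = (p : Int) + 1 by push_cast; ring,
        PySem.List.pyRange_one_succ_right (by omega : (1:Int) ≤ (p:Int)), List.foldl_append]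
    set out := (PySem.List.pyRange 1 (p : Int) 1).foldl
      (fun cs i => PySem.List.pySetD cs i
        (PySem.List.pyGetD cs i 0 + PySem.List.pyGetD cs (i - 1) 0)) cs with hout
    simp only [List.foldl_cons, List.foldl_nil]
    have hplen : (p : Int) < (out.length : Int) := by rw [ihlen]; omega
    have houtp : PySem.List.pyGetD out (p : Int) 0 = PySem.List.pyGetD cs (p : Int) 0 := by
      rw [ihval p (by omega)]; simp
    have houtp1 : PySem.List.pyGetD out ((p : Int) - 1) 0
        = ((List.range p).map (fun (i : Nat) => PySem.List.pyGetD cs ((i : Nat) : Int) 0)).sum := by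
      rw [show ((p : Int) - 1) = ((p - 1 : Nat) : Int) by omega, ihval (p - 1) (by omega)]
      have : p - 1 < p := by omega
      simp only [this, if_pos]
      have : p - 1 + 1 = p := by omega
      rw [this]
    refine ⟨by rw [PySem.List.length_pySetD, ihlen], ?_⟩
    intro j hj
    rw [pyGetD_pySetD_full out (j : Int) (p : Int) _ 0 (by omega) hplen (by omega)]
    by_cases hjp : j = p
    · subst hjp
      simp only [if_pos (by omega : j < j + 1)]
      rw [houtp, houtp1]
      simp only [List.range_succ]
      simp [add_comm]
    · have hne : ¬ ((j : Int) = (p : Int)) := by omega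
      rw [if_neg hne, ihval j hj]
      by_cases hlt : j < p
      · simp [hlt, show j < p + 1 by omega]
      · simp [hlt, show ¬ (j < p + 1) by omega]

theorem cntKH_cons (k j : Int) (a : Char × Int) (l : List (Char × Int)) :
    cntKH k j (a :: l) = (if keyA a - k = j then 1 else 0) + cntKH k j l := by
  simp only [cntKH, List.filter_cons]
  by_cases h : keyA a - k = j
  · simp [h]; omega
  · have : (keyA a - k == j) = false := by simp [h]
    simp [this, h]

theorem getElem?_pySetD {α : Type} (xs : List α) (i : Int) (v : α) (p : Nat)
    (h0 : 0 ≤ i) (hlen : i < (xs.length : Int)) :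
    (PySem.List.pySetD xs i v)[p]? = if (p : Int) = i then some v else xs[p]? := by
  rw [PySem.List.pySetD_of_nonneg _ _ h0, List.getElem?_set]
  by_cases h : (p : Int) = i
  · simp [show i.toNat = p by omega, h, show p < xs.length by omega]
  · simp [show ¬ (i.toNat = p) by omega, h]

def placeF (k : Int) (v : Char × Int) (st : List Int × List (Option (Char × Int))) :
    List Int × List (Option (Char × Int)) :=
  (PySem.List.pySetD st.1 (keyA v - k) (PySem.List.pyGetD st.1 (keyA v - k) 0 - 1),
   PySem.List.pySetD st.2 (PySem.List.pyGetD st.1 (keyA v - k) 0 - 1) (some v))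

theorem place_spec (k : Int) (l : List (Char × Int)) (cs : List Int)
    (tmp : List (Option (Char × Int)))
    (hb : ∀ a ∈ l, 0 ≤ keyA a - k ∧ keyA a - k < (cs.length : Int))
    (hcs : ∀ j : Int, 0 ≤ j → j < (cs.length : Int) →
      (cntKH k j l : Int) ≤ PySem.List.pyGetD cs j 0 ∧
      PySem.List.pyGetD cs j 0 ≤ (tmp.length : Int))
    (hdisj : ∀ j1 j2 : Int, 0 ≤ j1 → j1 < j2 → j2 < (cs.length : Int) →
      PySem.List.pyGetD cs j1 0 ≤ PySem.List.pyGetD cs j2 0 - (cntKH k j2 l : Int)) :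
    (l.foldr (placeF k) (cs, tmp)).1.length = cs.length ∧
    (l.foldr (placeF k) (cs, tmp)).2.length = tmp.length ∧
    (∀ j : Int, 0 ≤ j → j < (cs.length : Int) →
      PySem.List.pyGetD (l.foldr (placeF k) (cs, tmp)).1 j 0
        = PySem.List.pyGetD cs j 0 - (cntKH k j l : Int)) ∧
    (∀ (j : Int) (q : Nat) (e : Char × Int), 0 ≤ j → j < (cs.length : Int) →
      (l.filter (fun a => keyA a - k == j))[q]? = some e →
      (l.foldr (placeF k) (cs, tmp)).2[(PySem.List.pyGetD cs j 0 - (cntKH k j l : Int)).toNat + q]?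
        = some (some e)) ∧
    (∀ p : Nat, (∀ j : Int, 0 ≤ j → j < (cs.length : Int) →
        ¬((PySem.List.pyGetD cs j 0 - (cntKH k j l : Int)) ≤ (p : Int) ∧
          (p : Int) < PySem.List.pyGetD cs j 0)) →
      (l.foldr (placeF k) (cs, tmp)).2[p]? = tmp[p]?) := by
  induction l with
  | nil =>
    refine ⟨rfl, rfl, by simp [cntKH], by simp [cntKH], fun p _ => rfl⟩
  | cons a l ih =>
    have hba := hb a (List.mem_cons_self ..)
    have hbl : ∀ b ∈ l, 0 ≤ keyA b - k ∧ keyA b - k < (cs.length : Int) :=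
      fun b hbm => hb b (List.mem_cons_of_mem _ hbm)
    have hcnt_le : ∀ j : Int, (cntKH k j l : Int) ≤ (cntKH k j (a :: l) : Int) := by
      intro j; rw [cntKH_cons]; split <;> push_cast <;> omega
    have hcsl : ∀ j : Int, 0 ≤ j → j < (cs.length : Int) →
        (cntKH k j l : Int) ≤ PySem.List.pyGetD cs j 0 ∧
        PySem.List.pyGetD cs j 0 ≤ (tmp.length : Int) :=
      fun j h0 h1 => ⟨le_trans (hcnt_le j) (hcs j h0 h1).1, (hcs j h0 h1).2⟩
    have hdisjl : ∀ j1 j2 : Int, 0 ≤ j1 → j1 < j2 → j2 < (cs.length : Int) →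
        PySem.List.pyGetD cs j1 0 ≤ PySem.List.pyGetD cs j2 0 - (cntKH k j2 l : Int) :=
      fun j1 j2 h0 h1 h2 => le_trans (hdisj j1 j2 h0 h1 h2) (by have := hcnt_le j2; omega)
    obtain ⟨len1, len2, hcounts, hplace, huntouched⟩ := ih hbl hcsl hdisjl
    set st := l.foldr (placeF k) (cs, tmp) with hst
    have hfold : (a :: l).foldr (placeF k) (cs, tmp) = placeF k a st := rfl
    have hjstar := hba
    have hcntstar : (cntKH k (keyA a - k) (a :: l) : Int) = (cntKH k (keyA a - k) l : Int) + 1 := by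
      rw [cntKH_cons]; simp; push_cast; omega
    have hstar1 : PySem.List.pyGetD st.1 (keyA a - k) 0
        = PySem.List.pyGetD cs (keyA a - k) 0 - (cntKH k (keyA a - k) l : Int) :=
      hcounts _ hba.1 hba.2
    set pos : Int := PySem.List.pyGetD cs (keyA a - k) 0 - (cntKH k (keyA a - k) (a :: l) : Int) with hposdef
    have hpos_eq : PySem.List.pyGetD st.1 (keyA a - k) 0 - 1 = pos := by rw [hstar1]; omega
    have hpos0 : 0 ≤ pos := by
      have := (hcs _ hba.1 hba.2).1; omega
    have hposlt : pos < (tmp.length : Int) := by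
      have h2 := (hcs _ hba.1 hba.2).2
      have h3 : (1 : Int) ≤ (cntKH k (keyA a - k) (a :: l) : Int) := by
        rw [cntKH_cons, if_pos rfl]; push_cast; omega
      omega
    have hst1len : st.1.length = cs.length := len1
    have hst2len : st.2.length = tmp.length := len2
    rw [hfold]
    simp only [placeF, hpos_eq]
    refine ⟨by rw [PySem.List.length_pySetD, len1], by rw [PySem.List.length_pySetD, len2], ?_, ?_, ?_⟩
    · -- counts after
      intro j h0 h1
      rw [pyGetD_pySetD_full st.1 j (keyA a - k) _ 0 hba.1 (by rw [hst1len]; exact hba.2) h0]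
      by_cases hjj : j = keyA a - k
      · subst hjj
        rw [if_pos rfl]
      · rw [if_neg hjj, hcounts j h0 h1, cntKH_cons, if_neg (fun hh => hjj (Eq.symm hh))]
        push_cast
        ring
    · -- placement
      intro j q e h0 h1 hq
      by_cases hjj : j = keyA a - k
      · subst hjj
        have hfilt : (a :: l).filter (fun b => keyA b - k == keyA a - k)
            = a :: l.filter (fun b => keyA b - k == keyA a - k) := by
          simp [List.filter_cons]
        rw [hfilt] at hq
        cases q with
        | zero =>
          simp only [List.getElem?_cons_zero, Option.some.injEq] at hq
          subst hq
          rw [Nat.add_zero, getElem?_pySetD st.2 pos _ _ hpos0 (by rw [hst2len]; exact hposlt),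
              if_pos (by omega)]
        | succ q' =>
          simp only [List.getElem?_cons_succ] at hq
          have hidx : (PySem.List.pyGetD cs (keyA a - k) 0 - (cntKH k (keyA a - k) (a :: l) : Int)).toNat + (q' + 1)
              = (PySem.List.pyGetD cs (keyA a - k) 0 - (cntKH k (keyA a - k) l : Int)).toNat + q' := by
            omega
          have hne : ¬ ((((PySem.List.pyGetD cs (keyA a - k) 0 - (cntKH k (keyA a - k) l : Int)).toNat + q' : Nat) : Int) = pos) := by
            omega
          rw [hidx, getElem?_pySetD st.2 pos _ _ hpos0 (by rw [hst2len]; exact hposlt), if_neg hne]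
          exact hplace _ q' e hba.1 hba.2 hq
      · have hfneq : (keyA a - k == j) = false :=
          beq_eq_false_iff_ne.mpr (fun hh => hjj (Eq.symm hh))
        have hfilt : (a :: l).filter (fun b => keyA b - k == j)
            = l.filter (fun b => keyA b - k == j) := by
          simp [List.filter_cons, hfneq]
        rw [hfilt] at hq
        have hcnteq : cntKH k j (a :: l) = cntKH k j l := by
          rw [cntKH_cons, if_neg (fun hh => hjj (Eq.symm hh))]
          omega
        have hqlt : q < cntKH k j l := by
          have hlen := (List.getElem?_eq_some_iff.mp hq).1
          simpa [cntKH] using hlen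
        have hcsj := hcsl j h0 h1
        have hblk0 : (0:Int) ≤ PySem.List.pyGetD cs j 0 - (cntKH k j l : Int) := by
          have := hcsj.1; omega
        have h3 : (1 : Nat) ≤ cntKH k (keyA a - k) (a :: l) := by
          rw [cntKH_cons, if_pos rfl]; omega
        have hne : ¬ ((((PySem.List.pyGetD cs j 0 - (cntKH k j l : Int)).toNat + q : Nat) : Int) = pos) := by
          by_cases hlt : j < keyA a - k
          · have hd := hdisj j (keyA a - k) h0 hlt hba.2
            omega
          · have hgt : keyA a - k < j := by omega
            have hd := hdisj (keyA a - k) j hba.1 hgt h1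
            have hcle := hcnt_le j
            omega
        rw [hcnteq, getElem?_pySetD st.2 pos _ _ hpos0 (by rw [hst2len]; exact hposlt), if_neg hne]
        exact hplace j q e h0 h1 hq
    · -- untouched
      intro p hout
      have houtl : ∀ j : Int, 0 ≤ j → j < (cs.length : Int) →
          ¬((PySem.List.pyGetD cs j 0 - (cntKH k j l : Int)) ≤ (p : Int) ∧
            (p : Int) < PySem.List.pyGetD cs j 0) := by
        intro j h0 h1 hcontra
        exact hout j h0 h1 ⟨by have := hcnt_le j; omega, hcontra.2⟩
      have hne : ¬ (((p : Nat) : Int) = pos) := by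
        intro hcontra
        have h3 : (1 : Nat) ≤ cntKH k (keyA a - k) (a :: l) := by
          rw [cntKH_cons, if_pos rfl]
          omega
        exact hout (keyA a - k) hba.1 hba.2 ⟨by omega, by omega⟩
      rw [getElem?_pySetD st.2 pos _ _ hpos0 (by rw [hst2len]; exact hposlt), if_neg hne]
      exact huntouched p houtl

theorem sum_single {α : Type} (key : α → Int) (a : α) (R : List Int) (hnd : R.Nodup)
    (hm : key a ∈ R) :
    (R.map (fun v => if key a == v then (1 : Nat) else 0)).sum = 1 := by
  induction R with
  | nil => simp at hm
  | cons v R ih =>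
    simp only [List.map_cons, List.sum_cons]
    by_cases hv : key a = v
    · have hnotin : key a ∉ R := by
        rw [hv]; exact (List.nodup_cons.mp hnd).1
      have hzero : (R.map (fun w => if key a == w then (1 : Nat) else 0)).sum = 0 := by
        rw [List.sum_eq_zero]
        intro x hx
        obtain ⟨w, hw, hwx⟩ := List.mem_map.mp hx
        have : (key a == w) = false := beq_eq_false_iff_ne.mpr (fun hh => hnotin (hh ▸ hw))
        simp [this] at hwx
        omega
      have hbeq : (key a == v) = true := by simp [hv]
      simp [hbeq]
      simpa using hzero
    · have hmem : key a ∈ R := by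
        rcases List.mem_cons.mp hm with h | h
        · exact absurd h hv
        · exact h
      have : (key a == v) = false := beq_eq_false_iff_ne.mpr hv
      rw [ih (List.nodup_cons.mp hnd).2 hmem]
      simp [this]

theorem sum_filter_lengths {α : Type} (key : α → Int) (l : List α) (R : List Int)
    (hnd : R.Nodup) (hm : ∀ a ∈ l, key a ∈ R) :
    (R.map (fun v => (l.filter (fun a => key a == v)).length)).sum = l.length := by
  induction l with
  | nil => simp
  | cons a l ih =>
    have hstep : R.map (fun v => ((a :: l).filter (fun b => key b == v)).length)
        = R.map (fun v => (if key a == v then 1 else 0) + (l.filter (fun b => key b == v)).length) := by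
      apply List.map_congr_left
      intro v _
      simp only [List.filter_cons]
      by_cases h : key a = v
      · simp [h]
        omega
      · have : (key a == v) = false := beq_eq_false_iff_ne.mpr h
        simp [this]
    rw [hstep]
    have sum_map_add_nat : ∀ (f g : Int → Nat) (S : List Int),
        (S.map (fun v => f v + g v)).sum = (S.map f).sum + (S.map g).sum := by
      intro f g S
      induction S with
      | nil => simp
      | cons w S ihS => simp only [List.map_cons, List.sum_cons, ihS]; omega
    have hsplit : (R.map (fun v => (if key a == v then 1 else 0) + (l.filter (fun b => key b == v)).length)).sum
        = (R.map (fun v => if key a == v then (1:Nat) else 0)).sum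
          + (R.map (fun v => (l.filter (fun b => key b == v)).length)).sum := by
      exact sum_map_add_nat _ _ R
    rw [hsplit, sum_single key a R hnd (hm a (List.mem_cons_self ..)),
        ih (fun b hb => hm b (List.mem_cons_of_mem _ hb))]
    simp [Nat.add_comm]

def sumKH (k : Int) (arr : List (Char × Int)) (j : Nat) : Int :=
  (((List.range (j + 1)).map (fun (i : Nat) => cntKH k (i : Int) arr)).sum : Nat)

theorem sumKH_succ (k : Int) (arr : List (Char × Int)) (j : Nat) :
    sumKH k arr (j + 1) = sumKH k arr j + (cntKH k ((j + 1 : Nat) : Int) arr : Int) := by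
  simp only [sumKH, List.range_succ, List.map_append, List.sum_append]
  push_cast
  simp

theorem sumKH_nonneg (k : Int) (arr : List (Char × Int)) (j : Nat) : (0:Int) ≤ sumKH k arr j := by
  simp only [sumKH]
  positivity

theorem sumKH_mono (k : Int) (arr : List (Char × Int)) {j1 j2 : Nat} (h : j1 ≤ j2) :
    (sumKH k arr j1 : Int) ≤ sumKH k arr j2 := by
  induction j2 with
  | zero => simp [Nat.le_zero.mp h]
  | succ j ih =>
    by_cases hj : j1 = j + 1
    · simp [hj]
    · have := ih (by omega)
      rw [sumKH_succ]
      have hc : (0:Int) ≤ (cntKH k ((j + 1 : Nat) : Int) arr : Int) := by positivity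
      omega

theorem cntKH_le_sumKH (k : Int) (arr : List (Char × Int)) (j : Nat) :
    (cntKH k (j : Int) arr : Int) ≤ sumKH k arr j := by
  cases j with
  | zero => simp [sumKH]
  | succ j' =>
    rw [sumKH_succ]
    have := sumKH_nonneg k arr j'
    push_cast
    push_cast at this
    omega

theorem sumKH_total (k : Int) (arr : List (Char × Int)) (K : Nat) (hK : 0 < K)
    (hb : ∀ a ∈ arr, 0 ≤ keyA a - k ∧ keyA a - k < (K : Int)) :
    sumKH k arr (K - 1) = (arr.length : Int) := by
  have hre : K - 1 + 1 = K := by omega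
  have hcast : ((List.range K).map (fun (i : Nat) => ((i : Nat) : Int))).Nodup :=
    List.Nodup.map (fun a b hab => by omega) (List.nodup_range)
  have hmem : ∀ a ∈ arr, keyA a - k ∈ (List.range K).map (fun (i : Nat) => ((i : Nat) : Int)) := by
    intro a ha
    refine List.mem_map.mpr ⟨(keyA a - k).toNat, List.mem_range.mpr ?_, ?_⟩
    · have := hb a ha; omega
    · have := hb a ha; omega
  have htot := sum_filter_lengths (fun a => keyA a - k) arr
    ((List.range K).map (fun (i : Nat) => ((i : Nat) : Int))) hcast hmem
  rw [List.map_map] at htot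
  have hcomp : ((List.range K).map ((fun v => (arr.filter (fun a => keyA a - k == v)).length) ∘ (fun (i : Nat) => ((i : Nat) : Int))))
      = (List.range K).map (fun (i : Nat) => cntKH k (i : Int) arr) := by
    apply List.map_congr_left
    intro i _
    simp [cntKH]
  rw [hcomp] at htot
  simp only [sumKH, hre]
  exact_mod_cast congrArg (fun (n : Nat) => (n : Int)) htot

theorem getElem?_flatMap_blocks {α γ : Type} (F : γ → List α) (R : List γ) (j q : Nat)
    (hj : j < R.length) {e : α} (he : (F R[j])[q]? = some e) :
    (R.flatMap F)[((R.take j).map (fun v => (F v).length)).sum + q]? = some e := by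
  induction R generalizing j with
  | nil => simp at hj
  | cons v R ih =>
    cases j with
    | zero =>
      simp only [List.take_zero, List.map_nil, List.sum_nil, Nat.zero_add, List.flatMap_cons]
      rw [List.getElem?_append_left]
      · simpa using he
      · have := (List.getElem?_eq_some_iff.mp (by simpa using he)).1
        exact this
    | succ j' =>
      simp only [List.flatMap_cons, List.take_succ_cons, List.map_cons, List.sum_cons]
      rw [Nat.add_assoc, List.getElem?_append_right (by omega)]
      have : (F v).length + (((R.take j').map (fun v => (F v).length)).sum + q) - (F v).length
          = ((R.take j').map (fun v => (F v).length)).sum + q := by omega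
      rw [this]
      exact ih j' (by simpa using hj) (by simpa using he)

theorem flatMap_pos_decomp {α γ : Type} (F : γ → List α) (R : List γ) (p : Nat)
    (hp : p < (R.flatMap F).length) :
    ∃ (j q : Nat) (v : γ), R[j]? = some v ∧ q < (F v).length ∧
      p = ((R.take j).map (fun w => (F w).length)).sum + q := by
  induction R generalizing p with
  | nil => simp at hp
  | cons v R ih =>
    by_cases hv : p < (F v).length
    · exact ⟨0, p, v, by simp, hv, by simp⟩
    · have hp' : p - (F v).length < (R.flatMap F).length := by
        simp only [List.flatMap_cons, List.length_append] at hp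
        omega
      obtain ⟨j, q, w, hw, hq, hpe⟩ := ih (p - (F v).length) hp'
      exact ⟨j + 1, q, w, by simpa using hw, hq, by
        simp only [List.take_succ_cons, List.map_cons, List.sum_cons]
        omega⟩

def blockH (arr : List (Char × Int)) (v : Int) : List (Char × Int) :=
  arr.filter (fun p => keyA p == v)

theorem beq_shift (a k j : Int) : ((a - k == j) : Bool) = (a == k + j) := by
  by_cases h : a - k = j
  · simp [h, show a = k + j by omega]
  · simp [h, show ¬ (a = k + j) by omega]

theorem pyGetD_replicate (K : Nat) (i : Int) (h : 0 ≤ i) :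
    PySem.List.pyGetD (List.replicate K (0 : Int)) i 0 = 0 := by
  rw [pyGetD_toNat _ _ _ h]
  simp only [List.getD_eq_getElem?_getD, List.getElem?_replicate]
  split <;> simp

theorem csort_eq (arr : List (Char × Int)) (k m : Int) (hne : arr ≠ [])
    (hb : ∀ a ∈ arr, k ≤ keyA a ∧ keyA a ≤ m) :
    csortA arr k m = (PySem.List.pyRange k (m + 1) 1).flatMap (blockH arr) := by
  obtain ⟨a0, ha0⟩ := List.exists_mem_of_ne_nil arr hne
  have hkm : k ≤ m := le_trans (hb a0 ha0).1 (hb a0 ha0).2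
  set K : Nat := (m - k + 1).toNat with hKdef
  have hKint : (K : Int) = m - k + 1 := by omega
  have hK0 : 0 < K := by omega
  set counts0 : List Int := List.replicate (m - k + 1).toNat 0 with hc0
  have hlen0 : counts0.length = K := by simp [hc0, hKdef]
  have hbk : ∀ a ∈ arr, 0 ≤ keyA a - k ∧ keyA a - k < (counts0.length : Int) := by
    intro a ha
    have := hb a ha
    refine ⟨by omega, by rw [hlen0]; omega⟩
  set counts1 : List Int := arr.foldl
    (fun cs val => PySem.List.pySetD cs (keyA val - k)
      (PySem.List.pyGetD cs (keyA val - k) 0 + 1)) counts0 with hc1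
  obtain ⟨hlen1, hval1⟩ := counts1_spec k arr counts0 hbk
  rw [← hc1] at hlen1 hval1
  have hlen1K : counts1.length = K := by rw [hlen1, hlen0]
  have hval1' : ∀ i : Int, 0 ≤ i → PySem.List.pyGetD counts1 i 0 = (cntKH k i arr : Int) := by
    intro i hi
    rw [hval1 i hi, pyGetD_replicate _ _ hi]
    ring
  set counts2 : List Int := (PySem.List.pyRange 1 (counts1.length : Int) 1).foldl
    (fun cs i => PySem.List.pySetD cs i
      (PySem.List.pyGetD cs i 0 + PySem.List.pyGetD cs (i - 1) 0)) counts1 with hc2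
  obtain ⟨hlen2, hval2⟩ := prefix_spec counts1 counts1.length (le_refl _) (by omega)
  rw [show ((counts1.length : Nat) : Int) = (counts1.length : Int) by norm_num, ← hc2] at hlen2 hval2
  have hlen2K : counts2.length = K := by rw [hlen2, hlen1K]
  have hval2' : ∀ j : Nat, j < K → PySem.List.pyGetD counts2 (j : Int) 0 = sumKH k arr j := by
    intro j hj
    rw [hval2 j (by omega), if_pos (by omega)]
    have hmapc : (List.range (j + 1)).map (fun (i : Nat) => PySem.List.pyGetD counts1 ((i : Nat) : Int) 0)
        = (List.range (j + 1)).map (fun (i : Nat) => ((cntKH k ((i : Nat) : Int) arr : Nat) : Int)) := by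
      apply List.map_congr_left
      intro i _
      exact hval1' (i : Int) (by omega)
    rw [hmapc]
    simp only [sumKH]
    rw [Nat.cast_list_sum, List.map_map]
    rfl
  set n : Nat := arr.length with hn
  set tmp : List (Option (Char × Int)) := List.replicate arr.length (none : Option (Char × Int)) with htmp
  have htmplen : tmp.length = n := by simp [htmp]; omega
  have hbtot : ∀ a ∈ arr, 0 ≤ keyA a - k ∧ keyA a - k < (K : Int) := by
    intro a ha
    have := hb a ha
    omega
  have hb2 : ∀ a ∈ arr, 0 ≤ keyA a - k ∧ keyA a - k < (counts2.length : Int) := by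
    intro a ha
    have := hbtot a ha
    rw [hlen2K]
    omega
  have hcnt_cast : ∀ j : Int, 0 ≤ j → cntKH k j arr = cntKH k ((j.toNat : Nat) : Int) arr := by
    intro j hj
    congr 1
    omega
  have hcs : ∀ j : Int, 0 ≤ j → j < (counts2.length : Int) →
      (cntKH k j arr : Int) ≤ PySem.List.pyGetD counts2 j 0 ∧
      PySem.List.pyGetD counts2 j 0 ≤ (tmp.length : Int) := by
    intro j h0 h1
    rw [hlen2K] at h1
    have hjK : j.toNat < K := by omega
    have hgt : PySem.List.pyGetD counts2 j 0 = sumKH k arr j.toNat := by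
      rw [show j = ((j.toNat : Nat) : Int) by omega]
      exact hval2' j.toNat hjK
    constructor
    · rw [hgt, hcnt_cast j h0]
      exact cntKH_le_sumKH k arr j.toNat
    · rw [hgt, htmplen]
      calc sumKH k arr j.toNat ≤ sumKH k arr (K - 1) := sumKH_mono k arr (by omega)
        _ = (n : Int) := by rw [sumKH_total k arr K hK0 hbtot, hn]
  have hdisj : ∀ j1 j2 : Int, 0 ≤ j1 → j1 < j2 → j2 < (counts2.length : Int) →
      PySem.List.pyGetD counts2 j1 0 ≤ PySem.List.pyGetD counts2 j2 0 - (cntKH k j2 arr : Int) := by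
    intro j1 j2 h0 h12 h2
    rw [hlen2K] at h2
    have hg1 : PySem.List.pyGetD counts2 j1 0 = sumKH k arr j1.toNat := by
      rw [show j1 = ((j1.toNat : Nat) : Int) by omega]
      exact hval2' j1.toNat (by omega)
    have hg2 : PySem.List.pyGetD counts2 j2 0 = sumKH k arr j2.toNat := by
      rw [show j2 = ((j2.toNat : Nat) : Int) by omega]
      exact hval2' j2.toNat (by omega)
    have hsplit : sumKH k arr j2.toNat = sumKH k arr (j2.toNat - 1) + (cntKH k j2 arr : Int) := by
      rw [show j2.toNat = (j2.toNat - 1) + 1 by omega, sumKH_succ]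
      rw [show ((j2.toNat - 1 + 1 : Nat) : Int) = j2 by omega]
      simp
    have hmono := sumKH_mono k arr (show j1.toNat ≤ j2.toNat - 1 by omega)
    rw [hg1, hg2]
    omega
  obtain ⟨plen1, plen2, pcounts, pplace, puntouched⟩ := place_spec k arr counts2 tmp hb2 hcs hdisj
  have hconv : (PySem.List.pyRange ((arr.length : Int) - 1) (-1) (-1)).foldl
      (fun (st : List Int × List (Option (Char × Int))) i =>
        let v := PySem.List.pyGetD arr i default
        let c := PySem.List.pyGetD st.1 (keyA v - k) 0 - 1
        (PySem.List.pySetD st.1 (keyA v - k) c, PySem.List.pySetD st.2 c (some v)))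
      (counts2, tmp) = arr.foldr (placeF k) (counts2, tmp) := by
    rw [PySem.List.pyRange_neg_one_eq_reverse, show (-1 : Int) + 1 = 0 by norm_num,
        show (arr.length : Int) - 1 + 1 = (arr.length : Int) by ring, List.foldl_reverse]
    conv_rhs => rw [show arr = (PySem.List.pyRange 0 (PySem.List.len arr) 1).map
      (fun j => PySem.List.pyGetD arr j default) from (PySem.List.map_pyGetD_pyRange_zero arr default).symm]
    rw [List.foldr_map]
    rfl
  have hfinal0 : csortA arr k m = ((PySem.List.pyRange ((arr.length : Int) - 1) (-1) (-1)).foldl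
      (fun (st : List Int × List (Option (Char × Int))) i =>
        let v := PySem.List.pyGetD arr i default
        let c := PySem.List.pyGetD st.1 (keyA v - k) 0 - 1
        (PySem.List.pySetD st.1 (keyA v - k) c, PySem.List.pySetD st.2 c (some v)))
      (counts2, tmp)).2.map (fun o => o.getD default) := rfl
  rw [hfinal0, hconv]
  -- now prove the mapped placement equals the concatenation of blocks
  apply List.ext_getElem?
  intro p
  have hRlen : ((PySem.List.pyRange k (m + 1) 1).flatMap (blockH arr)).length = n := by
    rw [List.length_flatMap, hn]
    have : ((PySem.List.pyRange k (m + 1) 1).map (fun v => (blockH arr v).length)).sum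
        = ((PySem.List.pyRange k (m + 1) 1).map (fun v => (arr.filter (fun a => keyA a == v)).length)).sum := rfl
    rw [this]
    exact sum_filter_lengths keyA arr _ (PySem.List.nodup_pyRange_one _ _)
      (fun a ha => PySem.List.mem_pyRange_one.mpr ⟨(hb a ha).1, by have := (hb a ha).2; omega⟩)
  have hLlen : ((arr.foldr (placeF k) (counts2, tmp)).2.map (fun o => o.getD default)).length = n := by
    rw [List.length_map, plen2, htmplen]
  by_cases hp : p < n
  · -- decompose p into block j, offset q
    obtain ⟨j, q, v, hv, hq, hpe⟩ := flatMap_pos_decomp (blockH arr) (PySem.List.pyRange k (m + 1) 1) p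
      (by rw [hRlen]; exact hp)
    have hjlen : j < (PySem.List.pyRange k (m + 1) 1).length := (List.getElem?_eq_some_iff.mp hv).1
    have hvval : v = k + (j : Int) := by
      have := (List.getElem?_eq_some_iff.mp hv).2
      rw [PySem.List.getElem_pyRange_one] at this
      omega
    have hjK : j < K := by
      have := hjlen
      rw [PySem.List.length_pyRange_one] at this
      omega
    -- the filter with shifted predicate is the block
    have hfeq : arr.filter (fun a => keyA a - k == (j : Int)) = blockH arr v := by
      unfold blockH
      apply List.filter_congr
      intro a _
      rw [beq_shift, hvval]
    -- RHS value
    have hRj : (PySem.List.pyRange k (m + 1) 1)[j] = v := (List.getElem?_eq_some_iff.mp hv).2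
    have hRHS : ((PySem.List.pyRange k (m + 1) 1).flatMap (blockH arr))[p]? = some ((blockH arr v)[q]) := by
      rw [hpe]
      refine getElem?_flatMap_blocks (blockH arr) _ j q hjlen ?_
      rw [hRj]
      exact List.getElem?_eq_some_iff.mpr ⟨hq, rfl⟩
    have he : (arr.filter (fun a => keyA a - k == (j : Int)))[q]? = some ((blockH arr v)[q]) := by
      rw [hfeq]
      exact List.getElem?_eq_some_iff.mpr ⟨hq, rfl⟩
    have pp := pplace (j : Int) q ((blockH arr v)[q]) (by omega) (by rw [hlen2K]; omega) he
    have hgj : PySem.List.pyGetD counts2 (j : Int) 0 = sumKH k arr j := hval2' j hjK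
    have hsplitj : sumKH k arr j
        = ((((List.range j).map (fun (i : Nat) => cntKH k ((i : Nat) : Int) arr)).sum : Nat) : Int)
          + (cntKH k ((j : Nat) : Int) arr : Int) := by
      simp only [sumKH, List.range_succ, List.map_append, List.sum_append]
      push_cast
      simp
    have htake : ((PySem.List.pyRange k (m + 1) 1).take j).map (fun w => (blockH arr w).length)
        = (List.range j).map (fun (i : Nat) => cntKH k ((i : Nat) : Int) arr) := by
      rw [PySem.List.pyRange_one, ← List.map_take, List.take_range, List.map_map]
      have hmin : min j (m + 1 - k).toNat = j := by omega
      rw [hmin]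
      apply List.map_congr_left
      intro i _
      simp only [Function.comp, blockH, cntKH]
      congr 1
      apply List.filter_congr
      intro a _
      rw [beq_shift]
    have hidx : (PySem.List.pyGetD counts2 (j : Int) 0 - (cntKH k (j : Int) arr : Int)).toNat + q = p := by
      rw [hgj]
      rw [hpe, htake]
      omega
    rw [hidx] at pp
    rw [hRHS, List.getElem?_map, pp]
    rfl
  · have h2 : ((PySem.List.pyRange k (m + 1) 1).flatMap (blockH arr)).length ≤ p := by
      rw [hRlen]; omega
    rw [List.getElem?_eq_none (by rw [hLlen]; omega), List.getElem?_eq_none h2]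

def mmStep (arr : List (Char × Int)) (gm : Int × Int) (i : Int) : Int × Int :=
  let a := keyA (PySem.List.pyGetD arr i default)
  let b := keyA (PySem.List.pyGetD arr (i + 1) default)
  if a > b then
    (if b < gm.1 then b else gm.1, if a > gm.2 then a else gm.2)
  else
    (if a < gm.1 then a else gm.1, if b > gm.2 then b else gm.2)

theorem mmStep_le (arr : List (Char × Int)) (gm : Int × Int) (i : Int) :
    (mmStep arr gm i).1 ≤ gm.1 ∧ gm.2 ≤ (mmStep arr gm i).2 := by
  simp only [mmStep]
  split_ifs <;> simp <;> omega

theorem mmStep_bounds (arr : List (Char × Int)) (gm : Int × Int) (i : Int) :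
    (mmStep arr gm i).1 ≤ keyA (PySem.List.pyGetD arr i default) ∧
    keyA (PySem.List.pyGetD arr i default) ≤ (mmStep arr gm i).2 ∧
    (mmStep arr gm i).1 ≤ keyA (PySem.List.pyGetD arr (i + 1) default) ∧
    keyA (PySem.List.pyGetD arr (i + 1) default) ≤ (mmStep arr gm i).2 := by
  simp only [mmStep]
  split_ifs <;> simp <;> omega

theorem mmStep_mem (arr : List (Char × Int)) (gm : Int × Int) (i : Int) :
    ((mmStep arr gm i).1 = gm.1 ∨ (mmStep arr gm i).1 = keyA (PySem.List.pyGetD arr i default) ∨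
      (mmStep arr gm i).1 = keyA (PySem.List.pyGetD arr (i + 1) default)) ∧
    ((mmStep arr gm i).2 = gm.2 ∨ (mmStep arr gm i).2 = keyA (PySem.List.pyGetD arr i default) ∨
      (mmStep arr gm i).2 = keyA (PySem.List.pyGetD arr (i + 1) default)) := by
  simp only [mmStep]
  split_ifs <;> simp

theorem mm_fold (arr : List (Char × Int)) (L : List Int) (gm : Int × Int) :
    (L.foldl (mmStep arr) gm).1 ≤ gm.1 ∧
    gm.2 ≤ (L.foldl (mmStep arr) gm).2 ∧
    (∀ i ∈ L,
      (L.foldl (mmStep arr) gm).1 ≤ keyA (PySem.List.pyGetD arr i default) ∧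
      keyA (PySem.List.pyGetD arr i default) ≤ (L.foldl (mmStep arr) gm).2 ∧
      (L.foldl (mmStep arr) gm).1 ≤ keyA (PySem.List.pyGetD arr (i + 1) default) ∧
      keyA (PySem.List.pyGetD arr (i + 1) default) ≤ (L.foldl (mmStep arr) gm).2) ∧
    ((L.foldl (mmStep arr) gm).1 = gm.1 ∨
      ∃ i ∈ L, (L.foldl (mmStep arr) gm).1 = keyA (PySem.List.pyGetD arr i default) ∨
        (L.foldl (mmStep arr) gm).1 = keyA (PySem.List.pyGetD arr (i + 1) default)) ∧
    ((L.foldl (mmStep arr) gm).2 = gm.2 ∨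
      ∃ i ∈ L, (L.foldl (mmStep arr) gm).2 = keyA (PySem.List.pyGetD arr i default) ∨
        (L.foldl (mmStep arr) gm).2 = keyA (PySem.List.pyGetD arr (i + 1) default)) := by
  induction L generalizing gm with
  | nil => exact ⟨le_refl _, le_refl _, by simp, Or.inl rfl, Or.inl rfl⟩
  | cons v L ih =>
    simp only [List.foldl_cons]
    obtain ⟨ih1, ih2, ih3, ih4, ih5⟩ := ih (mmStep arr gm v)
    have hs1 := mmStep_le arr gm v
    have hsb := mmStep_bounds arr gm v
    have hsm := mmStep_mem arr gm v
    refine ⟨le_trans ih1 hs1.1, le_trans hs1.2 ih2, ?_, ?_, ?_⟩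
    · intro i hi
      rcases List.mem_cons.mp hi with h | h
      · subst h
        exact ⟨le_trans ih1 hsb.1, le_trans hsb.2.1 ih2,
               le_trans ih1 hsb.2.2.1, le_trans hsb.2.2.2 ih2⟩
      · exact ih3 i h
    · rcases ih4 with h | ⟨i, hi, hcase⟩
      · rw [h]
        rcases hsm.1 with h' | h'
        · exact Or.inl h'
        · exact Or.inr ⟨v, List.mem_cons_self .., h'⟩
      · exact Or.inr ⟨i, List.mem_cons_of_mem _ hi, hcase⟩
    · rcases ih5 with h | ⟨i, hi, hcase⟩
      · rw [h]
        rcases hsm.2 with h' | h'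
        · exact Or.inl h'
        · exact Or.inr ⟨v, List.mem_cons_self .., h'⟩
      · exact Or.inr ⟨i, List.mem_cons_of_mem _ hi, hcase⟩

theorem minmax_spec (arr : List (Char × Int)) (hne : arr ≠ []) :
    (∀ a ∈ arr, (minmaxA arr).1 ≤ keyA a ∧ keyA a ≤ (minmaxA arr).2) ∧
    ((minmaxA arr).1 ∈ arr.map keyA) ∧ ((minmaxA arr).2 ∈ arr.map keyA) := by
  have hlast : PySem.List.pyGetD arr (-1) default = arr.getLast hne :=
    PySem.List.pyGetD_neg_one arr default hne
  have hg0mem : keyA (PySem.List.pyGetD arr (-1) default) ∈ arr.map keyA := by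
    rw [hlast]
    exact List.mem_map_of_mem (List.getLast_mem hne)
  have hL : ∀ i ∈ PySem.List.pyRange 0 ((arr.length : Int) - 1) 2,
      0 ≤ i ∧ i + 1 < (arr.length : Int) := by
    intro i hi
    have := (PySem.List.mem_pyRange_iff_of_pos (by norm_num) i).mp hi
    omega
  obtain ⟨h1, h2, h3, h4, h5⟩ := mm_fold arr (PySem.List.pyRange 0 ((arr.length : Int) - 1) 2)
    (keyA (PySem.List.pyGetD arr (-1) default), keyA (PySem.List.pyGetD arr (-1) default))
  have hmm : minmaxA arr = (PySem.List.pyRange 0 ((arr.length : Int) - 1) 2).foldl (mmStep arr)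
      (keyA (PySem.List.pyGetD arr (-1) default), keyA (PySem.List.pyGetD arr (-1) default)) := rfl
  have hkeymem : ∀ i ∈ PySem.List.pyRange 0 ((arr.length : Int) - 1) 2,
      keyA (PySem.List.pyGetD arr i default) ∈ arr.map keyA ∧
      keyA (PySem.List.pyGetD arr (i + 1) default) ∈ arr.map keyA := by
    intro i hi
    have hv := hL i hi
    constructor
    · rw [PySem.List.pyGetD_eq_getElem arr default hv.1 (by omega)]
      exact List.mem_map_of_mem (List.getElem_mem _)
    · rw [PySem.List.pyGetD_eq_getElem arr default (by omega) (by omega)]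
      exact List.mem_map_of_mem (List.getElem_mem _)
  refine ⟨?_, ?_, ?_⟩
  · intro a ha
    obtain ⟨l, hl, hleq⟩ := List.mem_iff_getElem.mp ha
    by_cases hlast' : l = arr.length - 1
    · have hgl : arr.getLast hne = a := by
        rw [List.getLast_eq_getElem]
        subst hlast'
        exact hleq
      rw [hmm]
      refine ⟨le_trans h1 (le_of_eq ?_), le_trans (le_of_eq ?_) h2⟩
      · rw [hlast, hgl]
      · rw [← hgl, ← hlast]
    · have hlt : l < arr.length - 1 := by
        have hlen0 : 0 < arr.length := List.length_pos_of_ne_nil hne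
        omega
      have hcov : ∃ i ∈ PySem.List.pyRange 0 ((arr.length : Int) - 1) 2,
          PySem.List.pyGetD arr i default = a ∨ PySem.List.pyGetD arr (i + 1) default = a := by
        by_cases hpar : l % 2 = 0
        · refine ⟨(l : Int), ?_, Or.inl ?_⟩
          · exact (PySem.List.mem_pyRange_iff_of_pos (by norm_num) _).mpr
              ⟨by omega, by omega, by omega⟩
          · rw [PySem.List.pyGetD_eq_getElem arr default (by omega) (by push_cast; omega)]
            simpa using hleq
        · refine ⟨((l : Int) - 1), ?_, Or.inr ?_⟩
          · exact (PySem.List.mem_pyRange_iff_of_pos (by norm_num) _).mpr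
              ⟨by omega, by omega, by omega⟩
          · rw [show (l : Int) - 1 + 1 = (l : Int) by ring,
                PySem.List.pyGetD_eq_getElem arr default (by omega) (by push_cast; omega)]
            simpa using hleq
      obtain ⟨i, hi, hia⟩ := hcov
      have hbnd := h3 i hi
      rw [hmm]
      rcases hia with h | h
      · rw [← h]
        exact ⟨hbnd.1, hbnd.2.1⟩
      · rw [← h]
        exact ⟨hbnd.2.2.1, hbnd.2.2.2⟩
  · rw [hmm]
    rcases h4 with h | ⟨i, hi, hcase⟩
    · rw [h]; exact hg0mem
    · rcases hcase with h | h
      · rw [h]; exact (hkeymem i hi).1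
      · rw [h]; exact (hkeymem i hi).2
  · rw [hmm]
    rcases h5 with h | ⟨i, hi, hcase⟩
    · rw [h]; exact hg0mem
    · rcases hcase with h | h
      · rw [h]; exact (hkeymem i hi).1
      · rw [h]; exact (hkeymem i hi).2

theorem keyA_nonneg (a : Char × Int) : 0 ≤ keyA a := by
  simp [keyA]

theorem countingSort_eq (arr : List (Char × Int)) (hb : ∀ a ∈ arr, keyA a < 127) :
    countingSortA arr = (PySem.List.pyRange 0 127 1).flatMap (blockH arr) := by
  by_cases hne : arr.isEmpty
  · have h0 : arr = [] := List.isEmpty_iff.mp hne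
    subst h0
    simp [countingSortA, blockH, List.flatMap_eq_nil_iff]
  · have hne' : arr ≠ [] := by simpa [List.isEmpty_iff] using hne
    unfold countingSortA
    rw [if_neg hne]
    obtain ⟨hbounds, hkmem, hmmem⟩ := minmax_spec arr hne'
    have hk0 : 0 ≤ (minmaxA arr).1 := by
      obtain ⟨a, _, ha⟩ := List.mem_map.mp hkmem
      rw [← ha]
      exact keyA_nonneg a
    have hm127 : (minmaxA arr).2 < 127 := by
      obtain ⟨a, hamem, ha⟩ := List.mem_map.mp hmmem
      rw [← ha]
      exact hb a hamem
    have hkm : (minmaxA arr).1 ≤ (minmaxA arr).2 := by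
      obtain ⟨a, hamem, ha⟩ := List.mem_map.mp hkmem
      have h := hbounds a hamem
      rw [ha] at h
      exact le_trans h.1 h.2
    rw [csort_eq arr (minmaxA arr).1 (minmaxA arr).2 hne' hbounds]
    have hsplit : PySem.List.pyRange 0 127 1
        = PySem.List.pyRange 0 (minmaxA arr).1 1
          ++ (PySem.List.pyRange (minmaxA arr).1 ((minmaxA arr).2 + 1) 1
              ++ PySem.List.pyRange ((minmaxA arr).2 + 1) 127 1) := by
      rw [← PySem.List.pyRange_one_append (minmaxA arr).1 ((minmaxA arr).2 + 1) 127
          (by obtain ⟨a, hamem, ha⟩ := List.mem_map.mp hkmem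
              have h := hbounds a hamem
              rw [ha] at h
              omega)
          (by omega),
          ← PySem.List.pyRange_one_append 0 (minmaxA arr).1 127 hk0 (by omega)]
    rw [hsplit, List.flatMap_append, List.flatMap_append]
    have hnil1 : (PySem.List.pyRange 0 (minmaxA arr).1 1).flatMap (blockH arr) = [] := by
      rw [List.flatMap_eq_nil_iff]
      intro v hv
      have hvlt := (PySem.List.mem_pyRange_one.mp hv).2
      rw [blockH, List.filter_eq_nil_iff]
      intro a hamem
      have := (hbounds a hamem).1
      simp only [beq_iff_eq]
      omega
    have hnil2 : (PySem.List.pyRange ((minmaxA arr).2 + 1) 127 1).flatMap (blockH arr) = [] := by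
      rw [List.flatMap_eq_nil_iff]
      intro v hv
      have hvge := (PySem.List.mem_pyRange_one.mp hv).1
      rw [blockH, List.filter_eq_nil_iff]
      intro a hamem
      have := (hbounds a hamem).2
      simp only [beq_iff_eq]
      omega
    rw [hnil1, hnil2]
    simp

def eListH (s : List Char) : List (Char × Int) :=
  (PySem.List.enumerate s 0).map (fun p => (p.2, p.1))

theorem xarr_eq (s : String) :
    (PySem.List.pyRange 0 (PySem.Str.len s) 1).map
      (fun i => ((PySem.Str.pyGet? s i).getD default, i)) = eListH s.toList := by
  rw [eListH, PySem.List.enumerate_eq_map_pyRange s.toList default, List.map_map]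
  rw [show PySem.Str.len s = PySem.List.len s.toList from rfl]
  apply List.map_congr_left
  intro i _
  rfl

theorem char_toNat_inj (a b : Char) (h : a.toNat = b.toNat) : a = b := by
  rw [← Char.ofNat_toNat a, ← Char.ofNat_toNat b, h]

theorem char_code_beq (d c : Char) : (((d.toNat : Int)) == ((c.toNat : Int))) = (d == c) := by
  by_cases h : d = c
  · simp [h]
  · have h1 : ¬ ((d.toNat : Int) = (c.toNat : Int)) := by
      intro hc
      exact h (char_toNat_inj d c (by omega))
    simp [h1, h]

def occH (s : List Char) (c : Char) : List Int :=
  ((PySem.List.enumerate s 0).filter (fun p => p.2 == c)).map (fun p => p.1)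

theorem blockH_eList (s : List Char) (c : Char) :
    blockH (eListH s) ((c.toNat : Int)) = (occH s c).map (fun i => (c, i)) := by
  rw [blockH, eListH, List.filter_map, occH, List.map_map]
  have hfe : (PySem.List.enumerate s 0).filter ((fun p => keyA p == (c.toNat : Int)) ∘ (fun p => (p.2, p.1)))
      = (PySem.List.enumerate s 0).filter (fun p => p.2 == c) := by
    apply List.filter_congr
    intro p _
    simp only [Function.comp, keyA]
    rw [char_code_beq]
  rw [hfe]
  apply List.map_congr_left
  intro p hp
  have : (p.2 == c) = true := (List.mem_filter.mp hp).2
  have hpc : p.2 = c := by simpa using this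
  simp [Function.comp, hpc]

theorem occH_nil (s : List Char) (c : Char) (h : c ∉ s) : occH s c = [] := by
  rw [occH, List.map_eq_nil_iff, List.filter_eq_nil_iff]
  intro p hp
  obtain ⟨k, hk, hpk⟩ := (PySem.List.mem_enumerate_iff s 0 p).mp hp
  simp only [hpk]
  intro hc
  exact h (by rw [← (by simpa using hc : s[k] = c)]; exact List.getElem_mem _)

theorem bucketsB_eq_swapped (s : List Char) :
    bucketsB s = ((PySem.List.enumerate s 0).map (fun p => (p.2, p.1))).foldl
      (fun d p => d.modify p.1 [] (· ++ [p.2])) PySem.Dict.empty := by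
  rw [List.foldl_map]
  rfl

theorem bucketsB_getD (s : List Char) (c : Char) :
    (bucketsB s).getD c [] = occH s c := by
  rw [bucketsB_eq_swapped, PySem.Dict.getD_foldl_modify_append, List.filter_map]
  have hfe : (PySem.List.enumerate s 0).filter ((fun p => p.1 == c) ∘ (fun p => (p.2, p.1)))
      = (PySem.List.enumerate s 0).filter (fun p => p.2 == c) := by
    apply List.filter_congr
    intro p _
    rfl
  rw [hfe, occH, List.map_map]
  simp [PySem.Dict.getD_empty]

theorem bucketsB_keys (s : List Char) : (bucketsB s).keys = PySem.List.dedup s := by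
  rw [bucketsB, PySem.Dict.keys_foldl_modify_key (PySem.List.enumerate s 0) (fun p => p.2) []
      (fun _ p old => old ++ [p.1]) PySem.Dict.empty]
  rw [show (PySem.Dict.empty : PySem.Dict Char (List Int)).keys = [] from rfl,
      PySem.Set.update_nil_left, PySem.List.map_snd_enumerate]
  simp

theorem bucketsB_keys_nodup (s : List Char) : (bucketsB s).keys.Nodup := by
  rw [bucketsB]
  exact PySem.Dict.nodup_keys_foldl_modify_key (PySem.List.enumerate s 0) (fun p => p.2) []
    (fun _ p old => old ++ [p.1]) PySem.Dict.empty (by simp [PySem.Dict.keys_empty])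

theorem bucketsB_items (s : List Char) :
    (bucketsB s).items = (PySem.List.dedup s).map (fun c => (c, occH s c)) := by
  rw [PySem.Dict.items_eq_map_keys (bucketsB s) (bucketsB_keys_nodup s) []]
  rw [bucketsB_keys]
  apply List.map_congr_left
  intro c _
  rw [bucketsB_getD]

theorem sum_le_of_le {γ : Type} (f g : γ → Nat) (R : List γ)
    (hle : ∀ v ∈ R, f v ≤ g v) : (R.map f).sum ≤ (R.map g).sum := by
  induction R with
  | nil => simp
  | cons v R ih =>
    simp only [List.map_cons, List.sum_cons]
    have h1 := hle v (List.mem_cons_self ..)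
    have h2 := ih (fun w hw => hle w (List.mem_cons_of_mem _ hw))
    omega

theorem eq_of_le_of_sum_eq {γ : Type} (f g : γ → Nat) (R : List γ)
    (hle : ∀ v ∈ R, f v ≤ g v) (hsum : (R.map g).sum = (R.map f).sum) :
    ∀ v ∈ R, f v = g v := by
  induction R with
  | nil => simp
  | cons v R ih =>
    simp only [List.map_cons, List.sum_cons] at hsum
    have h1 := hle v (List.mem_cons_self ..)
    have h2 := sum_le_of_le f g R (fun w hw => hle w (List.mem_cons_of_mem _ hw))
    intro w hw
    rcases List.mem_cons.mp hw with hwv | hwR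
    · subst hwv
      omega
    · exact ih (fun u hu => hle u (List.mem_cons_of_mem _ hu)) (by omega) w hwR

theorem blocks_bridge {α : Type} (key : α → Int) (ok : α → α → Prop)
    (hok : ∀ a b, ok a b → key a = key b) (R : List Int) (hnd : R.Nodup)
    (Fx Fy : Int → List α)
    (hFx : ∀ v ∈ R, ∀ a ∈ Fx v, key a = v) (hFy : ∀ v ∈ R, ∀ b ∈ Fy v, key b = v) :
    List.Forall₂ ok (R.flatMap Fx) (R.flatMap Fy) ↔
      ∀ v ∈ R, List.Forall₂ ok (Fx v) (Fy v) := by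
  induction R with
  | nil => simp
  | cons v R ih =>
    have hndR : R.Nodup := (List.nodup_cons.mp hnd).2
    have hvR : v ∉ R := (List.nodup_cons.mp hnd).1
    have hrx : ∀ a ∈ R.flatMap Fx, key a ∈ R := by
      intro a ha
      obtain ⟨w, hw, haw⟩ := List.mem_flatMap.mp ha
      rw [hFx w (List.mem_cons_of_mem _ hw) a haw]
      exact hw
    have hry : ∀ b ∈ R.flatMap Fy, key b ∈ R := by
      intro b hb
      obtain ⟨w, hw, hbw⟩ := List.mem_flatMap.mp hb
      rw [hFy w (List.mem_cons_of_mem _ hw) b hbw]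
      exact hw
    simp only [List.flatMap_cons]
    constructor
    · intro h
      obtain ⟨hlen, hget⟩ := List.forall₂_iff_get.mp h
      simp only [List.length_append] at hlen
      have hlenv : (Fx v).length = (Fy v).length := by
        by_contra hne
        rcases Nat.lt_or_ge (Fx v).length (Fy v).length with hlt | hge
        · set i := (Fx v).length with hidef
          have hi1 : i < (Fx v ++ R.flatMap Fx).length := by
            simp only [List.length_append]; omega
          have hi2 : i < (Fy v ++ R.flatMap Fy).length := by
            simp only [List.length_append]; omega
          have hpair := hget i (by simpa using hi1) (by simpa using hi2)
          have hkey := hok _ _ hpair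
          have hL : (Fx v ++ R.flatMap Fx).get ⟨i, by simpa using hi1⟩
              = (R.flatMap Fx)[0]'(by simp only [List.length_append] at hi1; omega) := by
            simp only [List.get_eq_getElem]
            rw [List.getElem_append_right (by omega)]
            congr 1
            omega
          have hM : (Fy v ++ R.flatMap Fy).get ⟨i, by simpa using hi2⟩
              = (Fy v)[i]'hlt := by
            simp only [List.get_eq_getElem]
            rw [List.getElem_append_left hlt]
          rw [hL, hM] at hkey
          have hkl : key ((R.flatMap Fx)[0]'(by simp only [List.length_append] at hi1; omega)) ∈ R :=
            hrx _ (List.getElem_mem _)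
          have hkr : key ((Fy v)[i]'hlt) = v :=
            hFy v (List.mem_cons_self ..) _ (List.getElem_mem _)
          rw [hkey, hkr] at hkl
          exact hvR hkl
        · have hlt : (Fy v).length < (Fx v).length := by omega
          set i := (Fy v).length with hidef
          have hi1 : i < (Fx v ++ R.flatMap Fx).length := by
            simp only [List.length_append]; omega
          have hi2 : i < (Fy v ++ R.flatMap Fy).length := by
            simp only [List.length_append]; omega
          have hpair := hget i (by simpa using hi1) (by simpa using hi2)
          have hkey := hok _ _ hpair
          have hL : (Fx v ++ R.flatMap Fx).get ⟨i, by simpa using hi1⟩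
              = (Fx v)[i]'hlt := by
            simp only [List.get_eq_getElem]
            rw [List.getElem_append_left hlt]
          have hM : (Fy v ++ R.flatMap Fy).get ⟨i, by simpa using hi2⟩
              = (R.flatMap Fy)[0]'(by simp only [List.length_append] at hi2; omega) := by
            simp only [List.get_eq_getElem]
            rw [List.getElem_append_right (by omega)]
            congr 1
            omega
          rw [hL, hM] at hkey
          have hkl : key ((Fx v)[i]'hlt) = v :=
            hFx v (List.mem_cons_self ..) _ (List.getElem_mem _)
          have hkr : key ((R.flatMap Fy)[0]'(by simp only [List.length_append] at hi2; omega)) ∈ R :=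
            hry _ (List.getElem_mem _)
          rw [← hkey, hkl] at hkr
          exact hvR hkr
      have htake := List.forall₂_take_append _ _ _ h
      have hdrop := List.forall₂_drop_append _ _ _ h
      rw [← hlenv, List.take_left] at htake
      rw [← hlenv, List.drop_left] at hdrop
      have hrest := (ih hndR (fun w hw => hFx w (List.mem_cons_of_mem _ hw))
        (fun w hw => hFy w (List.mem_cons_of_mem _ hw))).mp hdrop
      intro w hw
      rcases List.mem_cons.mp hw with hwv | hwR
      · rw [hwv]; exact htake
      · exact hrest w hwR
    · intro h
      have hhead := h v (List.mem_cons_self ..)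
      have hrest := (ih hndR (fun w hw => hFx w (List.mem_cons_of_mem _ hw))
        (fun w hw => hFy w (List.mem_cons_of_mem _ hw))).mpr
        (fun w hw => h w (List.mem_cons_of_mem _ hw))
      exact List.rel_append hhead hrest

theorem eListH_fst_mem (s : List Char) : ∀ a ∈ eListH s, a.1 ∈ s := by
  intro a ha
  obtain ⟨p, hp, hpa⟩ := List.mem_map.mp ha
  obtain ⟨k, hk, hpk⟩ := (PySem.List.mem_enumerate_iff s 0 p).mp hp
  rw [← hpa, hpk]
  exact List.getElem_mem _

theorem eListH_length (s : List Char) : (eListH s).length = s.length := by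
  rw [eListH, List.length_map, PySem.List.length_enumerate]

theorem all_pyRange_forall₂ {α : Type} (d : α) (X Y : List α) (n : Nat)
    (hX : X.length = n) (hY : Y.length = n) (f : α → α → Bool) :
    ((PySem.List.pyRange 0 (n : Int) 1).all
      (fun i => f (PySem.List.pyGetD X i d) (PySem.List.pyGetD Y i d)) = true) ↔
    List.Forall₂ (fun a b => f a b = true) X Y := by
  rw [List.all_eq_true, List.forall₂_iff_get]
  constructor
  · intro h
    refine ⟨by omega, ?_⟩
    intro i h1 h2
    have hi := h (i : Int) (PySem.List.mem_pyRange_one.mpr ⟨by omega, by omega⟩)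
    rw [PySem.List.pyGetD_eq_getElem X d (by omega) (by omega),
        PySem.List.pyGetD_eq_getElem Y d (by omega) (by omega)] at hi
    simp only [List.get_eq_getElem]
    simpa using hi
  · intro ⟨hl, h⟩
    intro i hi
    have hmem := PySem.List.mem_pyRange_one.mp hi
    rw [PySem.List.pyGetD_eq_getElem X d (by omega) (by omega),
        PySem.List.pyGetD_eq_getElem Y d (by omega) (by omega)]
    have := h i.toNat (by omega) (by omega)
    simpa using this

theorem dom_chars (s : String) (h : pvDomStr s = true) : ∀ c ∈ s.toList, c.toNat < 127 := by
  intro c hc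
  have := List.all_eq_true.mp h c hc
  simp only [pvDomChar, Bool.or_eq_true, Bool.and_eq_true, decide_eq_true_eq, beq_iff_eq] at this
  omega

theorem code_char_range (v : Int) (h0 : 0 ≤ v) (h1 : v < 127) :
    ((Char.ofNat v.toNat).toNat : Int) = v := by
  rw [Char.toNat_ofNat, if_pos (Or.inl (by omega))]
  omega

theorem tanagram_eq (x y : String) (t : Int) (hdom : Dom_tanagram x y t) :
    tanagram x y t = tanagram_alt x y t := by
  have hx : ∀ c ∈ x.toList, c.toNat < 127 := by
    apply dom_chars
    simp only [Dom_tanagram, Bool.and_eq_true] at hdom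
    exact hdom.1.1
  have hy : ∀ c ∈ y.toList, c.toNat < 127 := by
    apply dom_chars
    simp only [Dom_tanagram, Bool.and_eq_true] at hdom
    exact hdom.1.2
  by_cases hlen : PySem.Str.len x ≠ PySem.Str.len y
  · simp only [tanagram, tanagram_alt, if_pos hlen]
  · simp only [tanagram, tanagram_alt, if_neg hlen]
    have heq : PySem.Str.len x = PySem.Str.len y := not_not.mp (by exact hlen)
    set n : Nat := x.toList.length with hn
    have hyn : y.toList.length = n := by
      simp only [PySem.Str.len] at heq
      omega
    have hkx : ∀ a ∈ eListH x.toList, keyA a < 127 := by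
      intro a ha
      have := hx a.1 (eListH_fst_mem _ a ha)
      simp only [keyA]
      omega
    have hky : ∀ a ∈ eListH y.toList, keyA a < 127 := by
      intro a ha
      have := hy a.1 (eListH_fst_mem _ a ha)
      simp only [keyA]
      omega
    have hyarr : (PySem.List.pyRange 0 (PySem.Str.len x) 1).map
        (fun i => ((PySem.Str.pyGet? y i).getD default, i)) = eListH y.toList := by
      rw [heq]
      exact xarr_eq y
    rw [xarr_eq x, hyarr, countingSort_eq _ hkx, countingSort_eq _ hky]
    have hmemRx : ∀ a ∈ eListH x.toList, keyA a ∈ PySem.List.pyRange 0 127 1 := by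
      intro a ha
      exact PySem.List.mem_pyRange_one.mpr ⟨keyA_nonneg a, hkx a ha⟩
    have hmemRy : ∀ a ∈ eListH y.toList, keyA a ∈ PySem.List.pyRange 0 127 1 := by
      intro a ha
      exact PySem.List.mem_pyRange_one.mpr ⟨keyA_nonneg a, hky a ha⟩
    have hXlen : ((PySem.List.pyRange 0 127 1).flatMap (blockH (eListH x.toList))).length = n := by
      rw [List.length_flatMap]
      rw [show (PySem.List.pyRange 0 127 1).map (fun v => (blockH (eListH x.toList) v).length)
          = (PySem.List.pyRange 0 127 1).map (fun v => ((eListH x.toList).filter (fun a => keyA a == v)).length) from rfl]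
      rw [sum_filter_lengths keyA (eListH x.toList) _ (PySem.List.nodup_pyRange_one _ _) hmemRx]
      exact eListH_length x.toList
    have hYlen : ((PySem.List.pyRange 0 127 1).flatMap (blockH (eListH y.toList))).length = n := by
      rw [List.length_flatMap]
      rw [show (PySem.List.pyRange 0 127 1).map (fun v => (blockH (eListH y.toList) v).length)
          = (PySem.List.pyRange 0 127 1).map (fun v => ((eListH y.toList).filter (fun a => keyA a == v)).length) from rfl]
      rw [sum_filter_lengths keyA (eListH y.toList) _ (PySem.List.nodup_pyRange_one _ _) hmemRy]
      rw [eListH_length y.toList]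
      exact hyn
    rw [show PySem.Str.len x = ((n : Nat) : Int) from rfl]
    rw [Bool.eq_iff_iff]
    rw [all_pyRange_forall₂ default _ _ n hXlen hYlen
      (fun a b => !(decide (a.1 ≠ b.1) || decide (|a.2 - b.2| > t)))]
    rw [blocks_bridge keyA _ (fun a b hab => by
        simp only [Bool.not_eq_eq_eq_not, Bool.not_true, Bool.or_eq_false_iff,
          decide_eq_false_iff_not, not_not] at hab
        simp only [keyA, hab.1]) _ (PySem.List.nodup_pyRange_one _ _)
      (blockH (eListH x.toList)) (blockH (eListH y.toList))
      (fun v _ a ha => by simpa using (List.mem_filter.mp ha).2)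
      (fun v _ b hb => by simpa using (List.mem_filter.mp hb).2)]
    -- B side
    rw [List.all_eq_true]
    have hitems := bucketsB_items x.toList
    -- per-char iff between the code block Forall₂ and the bucket check
    have blockIff : ∀ (c : Char),
        List.Forall₂ (fun a b => (!(decide (a.1 ≠ b.1) || decide (|a.2 - b.2| > t))) = true)
          (blockH (eListH x.toList) ((c.toNat : Int))) (blockH (eListH y.toList) ((c.toNat : Int)))
        ↔ (((occH y.toList c).length == (occH x.toList c).length)
            && ((occH x.toList c).zip (occH y.toList c)).all (fun q => !(|q.1 - q.2| > t))) = true := by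
      intro c
      rw [blockH_eList, blockH_eList, List.forall₂_map_left_iff, List.forall₂_map_right_iff,
          Bool.and_eq_true, beq_iff_eq, List.all_eq_true]
      constructor
      · intro h
        obtain ⟨hl, hz⟩ := List.forall₂_iff_zip.mp h
        exact ⟨hl.symm, fun q hq => by simpa using hz hq⟩
      · intro ⟨hl, hz⟩
        rw [List.forall₂_iff_zip]
        exact ⟨hl.symm, fun {a b} hab => by simpa using hz (a, b) hab⟩
    constructor
    · -- code blocks → bucket check
      intro h p hp
      rw [hitems] at hp
      obtain ⟨c, hc, hcp⟩ := List.mem_map.mp hp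
      have hcx : c ∈ x.toList := by
        exact (PySem.List.mem_dedup _ _).mp hc
      have hc127 : c.toNat < 127 := hx c hcx
      have hvR : ((c.toNat : Int)) ∈ PySem.List.pyRange 0 127 1 :=
        PySem.List.mem_pyRange_one.mpr ⟨by omega, by omega⟩
      have := (blockIff c).mp (h _ hvR)
      rw [← hcp]
      simpa [bucketsB_getD] using this
    · -- bucket check → code blocks
      intro h v hv
      obtain ⟨hv0, hv127⟩ := PySem.List.mem_pyRange_one.mp hv
      set c : Char := Char.ofNat v.toNat with hcdef
      have hvc : ((c.toNat : Int)) = v := code_char_range v hv0 hv127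
      have hB : ∀ c' ∈ x.toList,
          (((occH y.toList c').length == (occH x.toList c').length)
            && ((occH x.toList c').zip (occH y.toList c')).all (fun q => !(|q.1 - q.2| > t))) = true := by
        intro c' hc'
        have hp : (c', occH x.toList c') ∈ (bucketsB x.toList).items := by
          rw [hitems]
          exact List.mem_map.mpr ⟨c', (PySem.List.mem_dedup _ _).mpr hc', rfl⟩
        have := h _ hp
        simpa [bucketsB_getD] using this
      rw [← hvc]
      by_cases hcx : c ∈ x.toList
      · exact (blockIff c).mpr (hB c hcx)
      · have hx0 : occH x.toList c = [] := occH_nil _ _ hcx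
        -- counting: the y bucket of c is empty too
        have hle : ∀ w ∈ PySem.List.pyRange 0 127 1,
            (blockH (eListH x.toList) w).length ≤ (blockH (eListH y.toList) w).length := by
          intro w hw
          obtain ⟨hw0, hw127⟩ := PySem.List.mem_pyRange_one.mp hw
          have hwc : (((Char.ofNat w.toNat).toNat : Int)) = w := code_char_range w hw0 hw127
          rw [← hwc, blockH_eList, blockH_eList, List.length_map, List.length_map]
          by_cases hcw : Char.ofNat w.toNat ∈ x.toList
          · have := hB _ hcw
            rw [Bool.and_eq_true, beq_iff_eq] at this
            omega
          · rw [occH_nil _ _ hcw]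
            simp
        have hsum : ((PySem.List.pyRange 0 127 1).map (fun w => (blockH (eListH y.toList) w).length)).sum
            = ((PySem.List.pyRange 0 127 1).map (fun w => (blockH (eListH x.toList) w).length)).sum := by
          rw [← List.length_flatMap, ← List.length_flatMap, hXlen, hYlen]
        have heqv := eq_of_le_of_sum_eq (fun w => (blockH (eListH x.toList) w).length)
          (fun w => (blockH (eListH y.toList) w).length) _ hle hsum _ hv
        have hy0 : occH y.toList c = [] := by
          have hxlen0 : (blockH (eListH x.toList) v).length = 0 := by
            rw [← hvc, blockH_eList, List.length_map, hx0]
            rfl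
          have heqv2 : (blockH (eListH x.toList) v).length
              = (blockH (eListH y.toList) v).length := heqv
          have hylen0 : (blockH (eListH y.toList) v).length = 0 := by
            rw [← heqv2, hxlen0]
          rw [← hvc, blockH_eList, List.length_map] at hylen0
          exact List.eq_nil_of_length_eq_zero hylen0
        rw [blockH_eList, blockH_eList, hx0, hy0]
        exact List.Forall₂.nil

-- ===== VERDICT (by name: the statement is the Claim_ definition above) =====
theorem tanagram_spec : Claim_equal_tanagram := by
  intro x y t hdom
  unfold Spec_tanagram
  exact tanagram_eq x y t hdom
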